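-- pv_equiv track=rewrite | github.com/LiborKudela/heat-battery | heat_battery/data/pages.py | subplot_grid_size
-- ===== SOURCE A (Python) =====
-- def subplot_grid_size(n):
--     rows, cols = 1, 1
--     for i in range(n):
--         if rows*cols >= n:
--             break
--         else:
--             if cols + 1 > rows:
--                 rows += 1
--             else:
--                 cols += 1
--     return rows, cols
-- ===== SOURCE B (Python) =====
-- def subplot_grid_size(n):
--     if n <= 1:
--         return 1, 1
--     rows = 1
--     while rows * rows < n:
--         rows += 1
--     cols = (n + rows - 1) // rows
--     return rows, cols
-- ===== Notes on version B (the rewrite author's own statement) =====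
-- stated objective: simpler
-- what changed: Replaces the alternating rows/cols growth loop with a ceil-sqrt search for rows plus a single ceiling division for cols.
import Mathlib
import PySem

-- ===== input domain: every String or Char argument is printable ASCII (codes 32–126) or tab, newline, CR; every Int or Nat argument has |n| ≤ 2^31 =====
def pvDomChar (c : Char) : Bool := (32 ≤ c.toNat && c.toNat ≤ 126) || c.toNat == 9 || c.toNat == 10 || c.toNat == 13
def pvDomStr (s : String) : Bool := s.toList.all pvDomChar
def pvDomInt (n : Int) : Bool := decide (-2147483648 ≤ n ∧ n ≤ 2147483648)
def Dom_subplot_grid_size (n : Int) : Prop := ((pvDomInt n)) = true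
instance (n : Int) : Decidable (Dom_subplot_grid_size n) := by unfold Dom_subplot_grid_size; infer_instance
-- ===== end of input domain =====

-- B replaces A's alternating rows/cols growth loop with a ceil-sqrt search for rows plus
-- one ceiling division for cols (objective: simpler).

-- ===== PORT A =====
-- 'for i in range(n)' with break, as fuel recursion on n.toNat over the same (rows, cols) state
def pvLoopA (n : Int) : Nat → Int → Int → Int × Int
  | 0, rows, cols => (rows, cols)
  | Nat.succ k, rows, cols =>
      if rows * cols ≥ n then (rows, cols)
      else if cols + 1 > rows then pvLoopA n k (rows + 1) cols
      else pvLoopA n k rows (cols + 1)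

def subplot_grid_size (n : Int) : Int × Int := pvLoopA n n.toNat 1 1

-- ===== PORT B =====
-- 'while rows * rows < n: rows += 1'; terminates since rows < n while the guard holds
def pvRowsLoop (n : Int) (r : Int) : Int :=
  if h : r * r < n then pvRowsLoop n (r + 1) else r
  termination_by (n - r).toNat
  decreasing_by
    have hr : r < n := by rcases (by omega : r ≤ 0 ∨ 0 < r) with h0 | h0 <;> nlinarith
    omega

def subplot_grid_size_alt (n : Int) : Int × Int :=
  if n ≤ 1 then (1, 1)
  else
    let rows := pvRowsLoop n 1
    let cols := PySem.Int.floordiv (n + rows - 1) rows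
    (rows, cols)

-- ===== PRECONDITION & SPEC =====
def Spec_subplot_grid_size (n : Int) (out : Int × Int) : Prop := out = subplot_grid_size_alt n
instance (n : Int) (out : Int × Int) : Decidable (Spec_subplot_grid_size n out) := by unfold Spec_subplot_grid_size; infer_instance

-- ===== CLAIM (what is proved, stated in full; the proofs are below) =====
def Claim_equal_subplot_grid_size : Prop := ∀ (n : Int), Dom_subplot_grid_size n → Spec_subplot_grid_size n (subplot_grid_size n)

-- ===== LEMMAS AND PROOFS =====

-- pvRowsLoop n 1 returns the least r ≥ 1 with n ≤ r*r (for n such that the start is below)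
theorem pvRowsLoop_char (n : Int) : ∀ (r : Int), 1 ≤ r → (r - 1) * (r - 1) < n →
    n ≤ pvRowsLoop n r * pvRowsLoop n r ∧
    (pvRowsLoop n r - 1) * (pvRowsLoop n r - 1) < n ∧ 1 ≤ pvRowsLoop n r := by
  intro r
  induction r using pvRowsLoop.induct n with
  | case1 r hlt ih =>
      intro h1 _
      rw [pvRowsLoop, dif_pos hlt]
      exact ih (by omega) (by simpa using hlt)
  | case2 r hlt =>
      intro h1 h2
      rw [pvRowsLoop, dif_neg hlt]
      exact ⟨by omega, h2, h1⟩

-- reachable loop states of A (just before a possible break)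
def pvReach (n r c : Int) : Prop :=
  (r = 1 ∧ c = 1) ∨ (1 ≤ c ∧ r = c + 1 ∧ c * c < n) ∨ (2 ≤ c ∧ r = c ∧ c * (c - 1) < n)

-- at break (product ≥ n) a reachable state is exactly B's answer
theorem pvBreak_eq_alt (n r c : Int) (hre : pvReach n r c) (hge : n ≤ r * c) :
    (r, c) = subplot_grid_size_alt n := by
  rcases hre with ⟨hr, hc⟩ | ⟨hc1, hr, hlt⟩ | ⟨hc2, hr, hlt⟩
  · subst hr; subst hc
    simp only [subplot_grid_size_alt, if_pos (by omega : n ≤ 1)]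
  · -- state (c+1, c), with c*c < n ≤ (c+1)*c
    subst hr
    have hn2 : ¬ n ≤ 1 := by nlinarith
    have hR := pvRowsLoop_char n 1 le_rfl (by omega)
    set R := pvRowsLoop n 1 with hRdef
    obtain ⟨hR1, hR2, hR3⟩ := hR
    have hReq : R = c + 1 := by nlinarith
    simp only [subplot_grid_size_alt, if_neg hn2]
    rw [← hRdef, hReq]
    have hcols : PySem.Int.floordiv (n + (c + 1) - 1) (c + 1) = c := by
      rw [PySem.Int.floordiv_eq_iff_of_pos (by omega)]
      constructor <;> nlinarith
    rw [hcols]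
  · -- state (c, c), with c*(c-1) < n ≤ c*c
    subst hr
    have hn2 : ¬ n ≤ 1 := by nlinarith
    have hR := pvRowsLoop_char n 1 le_rfl (by omega)
    set R := pvRowsLoop n 1 with hRdef
    obtain ⟨hR1, hR2, hR3⟩ := hR
    have hReq : R = r := by nlinarith
    simp only [subplot_grid_size_alt, if_neg hn2]
    rw [← hRdef, hReq]
    have hcols : PySem.Int.floordiv (n + r - 1) r = r := by
      rw [PySem.Int.floordiv_eq_iff_of_pos (by omega)]
      constructor <;> nlinarith
    rw [hcols]

theorem pvLoopA_eq (n : Int) : ∀ (fuel : Nat) (r c : Int), pvReach n r c →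
    n ≤ r * c + fuel → pvLoopA n fuel r c = subplot_grid_size_alt n := by
  intro fuel
  induction fuel with
  | zero =>
      intro r c hre hf
      simpa [pvLoopA] using pvBreak_eq_alt n r c hre (by omega)
  | succ k ih =>
      intro r c hre hf
      by_cases hge : r * c ≥ n
      · simpa [pvLoopA, if_pos hge] using pvBreak_eq_alt n r c hre hge
      · have hshape : (r = c ∧ 1 ≤ c) ∨ (r = c + 1 ∧ 1 ≤ c) := by
          rcases hre with ⟨h1, h2⟩ | ⟨h1, h2, _⟩ | ⟨h1, h2, _⟩
          · exact Or.inl ⟨by omega, by omega⟩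
          · exact Or.inr ⟨h2, h1⟩
          · exact Or.inl ⟨h2, by omega⟩
        rcases hshape with ⟨heq, hc1⟩ | ⟨heq, hc1⟩
        · -- rows = cols: grow rows
          have hcond : c + 1 > r := by omega
          rw [pvLoopA, if_neg (by omega), if_pos hcond]
          apply ih
          · exact Or.inr (Or.inl ⟨hc1, by omega, by nlinarith⟩)
          · push_cast at hf ⊢; nlinarith
        · -- rows = cols + 1: grow cols
          have hcond : ¬ (c + 1 > r) := by omega
          rw [pvLoopA, if_neg (by omega), if_neg hcond]
          apply ih
          · exact Or.inr (Or.inr ⟨by omega, by omega, by nlinarith⟩)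
          · push_cast at hf ⊢; nlinarith

-- ===== VERDICT (by name: the statement is the Claim_ definition above) =====
theorem subplot_grid_size_spec : Claim_equal_subplot_grid_size := by
  intro n _
  show subplot_grid_size n = subplot_grid_size_alt n
  unfold subplot_grid_size
  apply pvLoopA_eq
  · exact Or.inl ⟨rfl, rfl⟩
  · omega
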